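-- pv_equiv track=rewrite | github.com/pypi-data/pypi-mirror-368 | packages/latin-rectangles/latin_rectangles-0.1.2.tar.gz/latin_rectangles-0.1.2/src/latin_rectangles/rook_polynomials.py | multiply_polynomials
-- ===== SOURCE A (Python) =====
-- def multiply_polynomials(poly1: list[int], poly2: list[int]) -> list[int]:
--     """
--     Multiplies two polynomials given as lists of coefficients.
--
--     Args:
--         poly1: First polynomial as list of coefficients.
--         poly2: Second polynomial as list of coefficients.
--
--     Returns:
--         Product polynomial as list of coefficients.
--     """
--     len1, len2 = len(poly1), len(poly2)
--     new_len = len1 + len2 - 1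
--     result_poly = [0] * new_len
--     for i in range(len1):
--         for j in range(len2):
--             result_poly[i + j] += poly1[i] * poly2[j]
--     return result_poly
-- ===== SOURCE B (Python) =====
-- def _poly_add(p, q):
--     out = [x + y for x, y in zip(p, q)]
--     out.extend(p[len(q):])
--     out.extend(q[len(p):])
--     return out
--
--
-- def multiply_polynomials(poly1: list[int], poly2: list[int]) -> list[int]:
--     if not poly1 or not poly2:
--         return []
--     acc = []
--     for a in reversed(poly1):
--         acc = _poly_add([a * c for c in poly2], [0] + acc)
--     return acc
-- ===== Notes on version B (the rewrite author's own statement) =====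
-- stated objective: alternative
-- what changed: Replaces the index-based double loop writing into a preallocated zero array by a Horner-style fold: scale poly2 by each coefficient of poly1 (back to front) and accumulate with a shifted polynomial addition; no index arithmetic or preallocation.
-- intended difference: When exactly one input list is empty and the other has length >= 2, A returns a list of len-1 padding zeros ([0]*(len1+len2-1), an artefact of its length formula), while B returns [], the natural representation of the zero product. — e.g. on multiply_polynomials([], [1, 2]): A returns [0], B returns []
import Mathlib
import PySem

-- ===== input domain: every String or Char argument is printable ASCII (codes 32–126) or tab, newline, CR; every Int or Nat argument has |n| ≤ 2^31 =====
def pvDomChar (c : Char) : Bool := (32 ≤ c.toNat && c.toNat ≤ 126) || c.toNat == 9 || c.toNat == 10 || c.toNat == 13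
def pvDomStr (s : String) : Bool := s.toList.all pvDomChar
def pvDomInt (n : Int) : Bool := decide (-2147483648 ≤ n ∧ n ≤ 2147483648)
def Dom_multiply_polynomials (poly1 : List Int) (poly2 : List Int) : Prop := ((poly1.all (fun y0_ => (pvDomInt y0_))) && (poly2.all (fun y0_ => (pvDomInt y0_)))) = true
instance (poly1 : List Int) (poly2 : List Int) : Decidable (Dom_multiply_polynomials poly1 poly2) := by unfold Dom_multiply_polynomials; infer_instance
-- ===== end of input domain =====

-- B replaces A's index-based double loop into a preallocated zero array by a Horner-style fold
-- of shifted polynomial additions (objective: alternative); when exactly one factor is the empty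
-- list, B returns [] where A returns a list of padding zeros (see D_ below).

-- ===== PORT A =====
-- All indices i+j lie in [0, new_len), so pyGetD/pySetD with default are exact for
-- Python's result_poly[i+j] read/write (no IndexError is reachable).
def multiply_polynomials (poly1 : List Int) (poly2 : List Int) : List Int :=
  let len1 : Int := poly1.length
  let len2 : Int := poly2.length
  let newLen : Int := len1 + len2 - 1
  let result : List Int := List.replicate newLen.toNat 0
  (PySem.List.pyRange 0 len1 1).foldl (fun r i =>
    (PySem.List.pyRange 0 len2 1).foldl (fun r j =>
      PySem.List.pySetD r (i + j)
        (PySem.List.pyGetD r (i + j) 0 + PySem.List.pyGetD poly1 i 0 * PySem.List.pyGetD poly2 j 0)) r) result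

-- ===== PORT B =====
-- transcription of Source B's _poly_add: zipped elementwise sum, then the leftover tail of either
-- list (p[len(q):] / q[len(p):] with a nonnegative start index is exactly List.drop here)
def polyAdd (p q : List Int) : List Int :=
  (List.zipWith (· + ·) p q ++ p.drop q.length) ++ q.drop p.length

def multiply_polynomials_alt (poly1 : List Int) (poly2 : List Int) : List Int :=
  if poly1 = [] ∨ poly2 = [] then []
  else poly1.reverse.foldl (fun acc a => polyAdd (poly2.map (fun c => a * c)) (0 :: acc)) []

-- ===== PRECONDITION & SPEC =====
-- When exactly one input list is empty and the other has length ≥ 2, A returns a list of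
-- padding zeros [0]*(len1+len2-1) — an artefact of its length formula — while B returns [],
-- the natural representation of the zero product.
def D_multiply_polynomials (poly1 : List Int) (poly2 : List Int) : Prop :=
  (poly1 = [] ∧ 2 ≤ poly2.length) ∨ (poly2 = [] ∧ 2 ≤ poly1.length)
instance (poly1 : List Int) (poly2 : List Int) : Decidable (D_multiply_polynomials poly1 poly2) := by
  unfold D_multiply_polynomials; infer_instance

def Spec_multiply_polynomials (poly1 : List Int) (poly2 : List Int) (out : List Int) : Prop :=
  ¬ D_multiply_polynomials poly1 poly2 → out = multiply_polynomials_alt poly1 poly2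
instance (poly1 : List Int) (poly2 : List Int) (out : List Int) : Decidable (Spec_multiply_polynomials poly1 poly2 out) := by
  unfold Spec_multiply_polynomials; infer_instance

def pvDiffWitness_multiply_polynomials : List Int × List Int := ([], [1, 2])
def pvDiffWitnessOut_multiply_polynomials : (List Int) × (List Int) := ([0], [])

-- ===== CLAIM (what is proved, stated in full; the proofs are below) =====
def Claim_unchanged_multiply_polynomials : Prop := ∀ (poly1 : List Int) (poly2 : List Int), Dom_multiply_polynomials poly1 poly2 → Spec_multiply_polynomials poly1 poly2 (multiply_polynomials poly1 poly2)
def Claim_changed_multiply_polynomials : Prop := Dom_multiply_polynomials (pvDiffWitness_multiply_polynomials.1) (pvDiffWitness_multiply_polynomials.2) ∧ D_multiply_polynomials (pvDiffWitness_multiply_polynomials.1) (pvDiffWitness_multiply_polynomials.2) ∧ multiply_polynomials (pvDiffWitness_multiply_polynomials.1) (pvDiffWitness_multiply_polynomials.2) = pvDiffWitnessOut_multiply_polynomials.1 ∧ multiply_polynomials_alt (pvDiffWitness_multiply_polynomials.1) (pvDiffWitness_multiply_polynomials.2) = pvDiffWitnessOut_multiply_polynomials.2 ∧ pvDiffWitnessOut_multiply_polynomials.1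 ≠ pvDiffWitnessOut_multiply_polynomials.2
def Claim_exact_multiply_polynomials : Prop := ∀ (poly1 : List Int) (poly2 : List Int), Dom_multiply_polynomials poly1 poly2 → D_multiply_polynomials poly1 poly2 → multiply_polynomials poly1 poly2 ≠ multiply_polynomials_alt poly1 poly2

-- ===== LEMMAS AND PROOFS =====

-- Nat-indexed normal form of A's inner loop (row i: add c·poly2 into r at offset `off`)
def innerN (q : List Int) (c : Int) (off : Nat) (r : List Int) : List Int :=
  (List.range q.length).foldl (fun r k => r.set (off + k) (r.getD (off + k) 0 + c * q.getD k 0)) r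

-- Nat-indexed normal form of A's outer loop
def outerN (p q : List Int) (r : List Int) : List Int :=
  (List.range p.length).foldl (fun r k => innerN q (p.getD k 0) k r) r

-- "add c·q into r at offset 0" as a structural recursion
def addSc (c : Int) : List Int → List Int → List Int
  | [], r => r
  | _ :: _, [] => []
  | b :: q, x :: r => (x + c * b) :: addSc c q r

def zadd (r s : List Int) : List Int := List.zipWith (· + ·) r s

-- generic: a fold whose every step fixes the head commutes with cons
theorem foldl_cons_hom {α : Type} (L : List α) (f g : List Int → α → List Int) (x : Int)
    (H : ∀ a ∈ L, ∀ r, f (x :: r) a = x :: g r a) :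
    ∀ r, L.foldl f (x :: r) = x :: L.foldl g r := by
  induction L with
  | nil => intro r; rfl
  | cons a L ih =>
      intro r
      simp only [List.foldl_cons, H a (by simp)]
      exact ih (fun b hb r => H b (by simp [hb]) r) _

theorem innerN_cons (q : List Int) (c : Int) (off : Nat) (x : Int) (r : List Int) :
    innerN q c (off + 1) (x :: r) = x :: innerN q c off r := by
  unfold innerN
  refine foldl_cons_hom _ _ _ _ (fun k _ r => ?_) r
  have h1 : off + 1 + k = (off + k) + 1 := by omega
  rw [h1, List.set_cons_succ, List.getD_cons_succ]

theorem innerN_zero (q : List Int) (c : Int) (r : List Int) (h : q.length ≤ r.length) :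
    innerN q c 0 r = addSc c q r := by
  induction q generalizing r with
  | nil => rfl
  | cons b q2 ih =>
      cases r with
      | nil => simp at h
      | cons x r =>
          unfold innerN
          rw [List.length_cons, List.range_succ_eq_map, List.foldl_cons, List.foldl_map]
          have e1 : (x :: r).set (0 + 0) ((x :: r).getD (0 + 0) 0 + c * (b :: q2).getD 0 0)
              = (x + c * b) :: r := by simp
          rw [e1]
          rw [foldl_cons_hom _ _
                (fun r k => r.set (0 + k) (r.getD (0 + k) 0 + c * q2.getD k 0)) _
                (fun k _ r' => by
                  have h2 : 0 + k.succ = (0 + k) + 1 := by omega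
                  rw [h2, List.set_cons_succ, List.getD_cons_succ]
                  rfl) r]
          have h3 := ih r (by simpa using Nat.le_of_succ_le_succ (by simpa using h))
          unfold innerN at h3
          rw [h3]
          rfl

theorem foldl_length_inv {α : Type} (L : List α) (f : List Int → α → List Int)
    (H : ∀ a s, (f s a).length = s.length) :
    ∀ r : List Int, (L.foldl f r).length = r.length := by
  induction L with
  | nil => intro r; rfl
  | cons a L ih => intro r; rw [List.foldl_cons, ih, H]

theorem innerN_length (q : List Int) (c : Int) (off : Nat) (r : List Int) :
    (innerN q c off r).length = r.length := by
  unfold innerN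
  exact foldl_length_inv _ _ (fun a s => by simp) r

theorem outerN_length (p q : List Int) (r : List Int) :
    (outerN p q r).length = r.length := by
  unfold outerN
  exact foldl_length_inv _ _ (fun a s => innerN_length _ _ _ _) r

theorem zadd_set (r : List Int) : ∀ (s : List Int) (k : Nat) (v : Int), r.length = s.length →
    zadd r (s.set k (s.getD k 0 + v)) = (zadd r s).set k ((zadd r s).getD k 0 + v) := by
  induction r with
  | nil =>
      intro s k v h
      have : s = [] := by cases s <;> simp_all
      subst this; rfl
  | cons a r ih =>
      intro s k v h
      cases s with
      | nil => simp at h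
      | cons b s =>
          cases k with
          | zero => simp [zadd]; ring
          | succ k =>
              simp only [zadd, List.zipWith_cons_cons, List.set_cons_succ,
                List.getD_cons_succ]
              exact congrArg (List.cons (a + b)) (ih s k v (by simpa using h))

theorem foldl_zadd {α : Type} (L : List α) (f : List Int → α → List Int)
    (Hlen : ∀ a s, (f s a).length = s.length)
    (H : ∀ a ∈ L, ∀ r s, r.length = s.length → f (zadd r s) a = zadd r (f s a)) :
    ∀ r s, r.length = s.length → L.foldl f (zadd r s) = zadd r (L.foldl f s) := by
  induction L with
  | nil => intro r s _; rfl
  | cons a L ih =>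
      intro r s hl
      simp only [List.foldl_cons, H a (by simp) r s hl]
      exact ih (fun b hb r s hrs => H b (List.mem_cons_of_mem a hb) r s hrs) r (f s a)
        (by rw [Hlen]; exact hl)

theorem innerN_zadd (q : List Int) (c : Int) (off : Nat) (r s : List Int)
    (h : r.length = s.length) : innerN q c off (zadd r s) = zadd r (innerN q c off s) := by
  unfold innerN
  refine foldl_zadd _ _ (fun a s => by simp) (fun k _ r s hrs => ?_) r s h
  exact (zadd_set r s (off + k) (c * q.getD k 0) hrs).symm

theorem outerN_zadd (p q : List Int) (r s : List Int) (h : r.length = s.length) :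
    outerN p q (zadd r s) = zadd r (outerN p q s) := by
  unfold outerN
  exact foldl_zadd (List.range p.length) (fun r k => innerN q (p.getD k 0) k r)
    (fun a s => innerN_length _ _ _ _) (fun k _ r s hrs => innerN_zadd _ _ _ _ _ hrs) r s h

theorem addSc_replicate (c : Int) : ∀ (q : List Int) (k : Nat), q.length ≤ k →
    addSc c q (List.replicate k 0) = q.map (fun x => c * x) ++ List.replicate (k - q.length) 0 := by
  intro q
  induction q with
  | nil => intro k _; rfl
  | cons b q2 ih =>
      intro k hk
      cases k with
      | zero => simp at hk
      | succ k =>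
          rw [List.replicate_succ]
          show (0 + c * b) :: addSc c q2 (List.replicate k 0) = _
          rw [ih k (by simpa using hk)]
          simp

theorem zadd_replicate_self (w : List Int) : zadd w (List.replicate w.length 0) = w := by
  induction w with
  | nil => rfl
  | cons a w ih => simp [zadd, List.replicate_succ] at ih ⊢; exact ih

theorem zadd_replicate_left : ∀ (r : List Int), zadd (List.replicate r.length 0) r = r := by
  intro r
  induction r with
  | nil => rfl
  | cons a r ih => simp [zadd, List.replicate_succ] at ih ⊢; exact ih

theorem polyAdd_pad (v : List Int) : ∀ (r : List Int), v.length ≤ r.length →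
    polyAdd v r = zadd (v ++ List.replicate (r.length - v.length) 0) r := by
  induction v with
  | nil =>
      intro r _
      show (List.zipWith (· + ·) [] r ++ List.drop r.length []) ++ r.drop 0
          = zadd ([] ++ List.replicate (r.length - List.length []) 0) r
      simp only [List.zipWith_nil_left, List.drop_nil, List.nil_append, List.drop_zero,
        List.length_nil, Nat.sub_zero]
      exact (zadd_replicate_left r).symm
  | cons a v ih =>
      intro r hr
      cases r with
      | nil => simp at hr
      | cons b r =>
          show (a + b) :: polyAdd v r = _
          rw [ih r (by simpa using hr)]
          simp [zadd, Nat.succ_sub_succ]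

theorem polyAdd_replicate (v : List Int) : ∀ (k : Nat), k ≤ v.length →
    polyAdd v (List.replicate k 0) = v := by
  induction v with
  | nil =>
      intro k hk
      have : k = 0 := by simpa using hk
      subst this; rfl
  | cons a v ih =>
      intro k hk
      cases k with
      | zero => simp [polyAdd]
      | succ k =>
          rw [List.replicate_succ]
          show (a + 0) :: polyAdd v (List.replicate k 0) = _
          rw [ih k (by simpa using hk), add_zero]

theorem outerN_nil_q (p : List Int) (r : List Int) : outerN p [] r = r := by
  unfold outerN
  have h : ∀ (L : List Nat) (r : List Int),
      L.foldl (fun r k => innerN [] (p.getD k 0) k r) r = r := by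
    intro L
    induction L with
    | nil => intro r; rfl
    | cons a L ih => intro r; rw [List.foldl_cons]; exact ih _
  exact h _ r

theorem outerN_nil_p (q r : List Int) : outerN [] q r = r := rfl

theorem outerN_cons (a : Int) (p q r : List Int) (x : Int) (t : List Int)
    (h : innerN q a 0 r = x :: t) :
    outerN (a :: p) q r = x :: outerN p q t := by
  unfold outerN
  rw [List.length_cons, List.range_succ_eq_map, List.foldl_cons, List.foldl_map]
  have h0 : innerN q ((a :: p).getD 0 0) 0 r = x :: t := h
  rw [h0]
  exact foldl_cons_hom _ _ (fun t k => innerN q (p.getD k 0) k t) x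
    (fun k _ t' => by rw [List.getD_cons_succ]; exact innerN_cons q (p.getD k 0) k x t') t

-- A in its Nat-indexed normal form
theorem A_eq_outerN (p q : List Int) :
    multiply_polynomials p q
      = outerN p q (List.replicate ((p.length : Int) + (q.length : Int) - 1).toNat 0) := by
  simp only [multiply_polynomials, outerN, innerN, PySem.List.pyRange_zero_nat,
    List.foldl_map, ← Nat.cast_add, PySem.List.pySetD_natCast, PySem.List.pyGetD_natCast]

-- the key recursion satisfied by A (q nonempty)
theorem A_rec (a : Int) (p q : List Int) (hq : q ≠ []) :
    multiply_polynomials (a :: p) q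
      = polyAdd (q.map (fun c => a * c)) (0 :: multiply_polynomials p q) := by
  obtain ⟨b, q2, rfl⟩ := List.exists_cons_of_ne_nil hq
  rw [A_eq_outerN, A_eq_outerN]
  have hL : ((((a :: p).length : Nat) : Int) + (((b :: q2).length : Nat) : Int) - 1).toNat
      = (p.length + q2.length) + 1 := by
    simp only [List.length_cons]; push_cast; omega
  have hR : (((p.length : Nat) : Int) + (((b :: q2).length : Nat) : Int) - 1).toNat
      = p.length + q2.length := by
    simp only [List.length_cons]; push_cast; omega
  rw [hL, hR]
  have hr0 : innerN (b :: q2) a 0 (List.replicate (p.length + q2.length + 1) 0)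
      = (0 + a * b) :: (q2.map (fun x => a * x) ++ List.replicate p.length 0) := by
    rw [innerN_zero _ _ _ (by simp), List.replicate_succ]
    show (0 + a * b) :: addSc a q2 (List.replicate (p.length + q2.length) 0) = _
    rw [addSc_replicate a q2 _ (by omega)]
    congr 3
    omega
  rw [outerN_cons a p (b :: q2) _ _ _ hr0]
  have htlen : (q2.map (fun x => a * x) ++ List.replicate p.length 0).length
      = p.length + q2.length := by simp [Nat.add_comm]
  have hlin : outerN p (b :: q2) (q2.map (fun x => a * x) ++ List.replicate p.length 0)
      = zadd (q2.map (fun x => a * x) ++ List.replicate p.length 0)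
          (outerN p (b :: q2) (List.replicate (p.length + q2.length) 0)) := by
    conv_lhs => rw [← zadd_replicate_self (q2.map (fun x => a * x) ++ List.replicate p.length 0)]
    rw [htlen]
    exact outerN_zadd _ _ _ _ (by simp [htlen])
  rw [hlin]
  rw [polyAdd_pad _ _ (by
    simp only [List.length_map, List.length_cons, outerN_length, List.length_replicate]
    omega)]
  have hpad : ((0 :: outerN p (b :: q2) (List.replicate (p.length + q2.length) 0)).length
        - ((b :: q2).map (fun c => a * c)).length) = p.length := by
    simp [outerN_length]
  rw [hpad]
  show (0 + a * b) :: zadd _ _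
      = zadd ((a * b :: q2.map (fun c => a * c)) ++ List.replicate p.length 0)
          (0 :: outerN p (b :: q2) (List.replicate (p.length + q2.length) 0))
  show _ = (a * b + 0) :: zadd (q2.map (fun c => a * c) ++ List.replicate p.length 0)
      (outerN p (b :: q2) (List.replicate (p.length + q2.length) 0))
  rw [zero_add, add_zero]

theorem A_eq_foldr (p q : List Int) (hp : p ≠ []) (hq : q ≠ []) :
    multiply_polynomials p q
      = p.foldr (fun a acc => polyAdd (q.map (fun c => a * c)) (0 :: acc)) [] := by
  induction p with
  | nil => exact absurd rfl hp
  | cons a p ih =>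
      rw [A_rec a p q hq]
      cases p with
      | nil =>
          obtain ⟨b, q2, rfl⟩ := List.exists_cons_of_ne_nil hq
          rw [A_eq_outerN]
          have h0 : ((((List.nil (α := Int)).length : Nat) : Int)
              + (((b :: q2).length : Nat) : Int) - 1).toNat = q2.length := by
            simp only [List.length_nil, List.length_cons]; push_cast; omega
          rw [h0]
          show polyAdd ((b :: q2).map fun c => a * c)
              (0 :: List.replicate q2.length 0) = _
          rw [← List.replicate_succ,
            polyAdd_replicate _ _ (by simp)]
          show _ = polyAdd ((b :: q2).map fun c => a * c) (0 :: [])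
          rw [show (0 :: ([] : List Int)) = List.replicate 1 0 from rfl,
            polyAdd_replicate _ _ (by simp)]
      | cons a2 p2 =>
          rw [ih (by simp)]
          rfl

-- ===== VERDICT (by name: the statement is the Claim_ definition above) =====
theorem multiply_polynomials_spec : Claim_unchanged_multiply_polynomials := by
  intro p q _
  unfold Spec_multiply_polynomials
  intro hnD
  unfold D_multiply_polynomials at hnD
  unfold multiply_polynomials_alt
  by_cases hp : p = []
  · subst hp
    rw [if_pos (Or.inl rfl), A_eq_outerN]
    have hq1 : q.length ≤ 1 := by
      by_contra h
      exact hnD (Or.inl ⟨rfl, by omega⟩)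
    have h0 : ((((List.nil (α := Int)).length : Nat) : Int)
        + ((q.length : Nat) : Int) - 1).toNat = 0 := by
      simp only [List.length_nil]; push_cast; omega
    rw [h0]
    rfl
  · by_cases hq : q = []
    · subst hq
      rw [if_pos (Or.inr rfl), A_eq_outerN, outerN_nil_q]
      have hp1 : p.length ≤ 1 := by
        by_contra h
        exact hnD (Or.inr ⟨rfl, by omega⟩)
      have h0 : (((p.length : Nat) : Int)
          + (((List.nil (α := Int)).length : Nat) : Int) - 1).toNat = 0 := by
        simp only [List.length_nil]; push_cast; omega
      rw [h0]
      rfl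
    · have hne : ¬(p = [] ∨ q = []) := by simp [hp, hq]
      rw [if_neg hne, List.foldl_reverse]
      exact A_eq_foldr p q hp hq

theorem multiply_polynomials_changed : Claim_changed_multiply_polynomials := by
  unfold Claim_changed_multiply_polynomials; decide

theorem multiply_polynomials_tight : Claim_exact_multiply_polynomials := by
  intro p q _ hD hEq
  rcases hD with ⟨hp, h2⟩ | ⟨hq, h2⟩
  · subst hp
    have halt : multiply_polynomials_alt [] q = [] := by
      simp [multiply_polynomials_alt]
    rw [A_eq_outerN, outerN_nil_p, halt] at hEq
    simp only [List.replicate_eq_nil_iff, List.length_nil] at hEq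
    omega
  · subst hq
    have halt : multiply_polynomials_alt p [] = [] := by
      simp [multiply_polynomials_alt]
    rw [A_eq_outerN, outerN_nil_q, halt] at hEq
    simp only [List.replicate_eq_nil_iff, List.length_nil] at hEq
    omega
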